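-- pv_equiv track=rewrite | github.com/MateuszMachowina/learning-computer-science-pl | python/75/75.py | szuk
-- ===== SOURCE A (Python) =====
-- def afiniczny(litera, A, B):
--     litera = ord(litera) - 97
--     litera*= A
--     litera+= B
--     if litera>25:
--         litera= litera % 26
--     return chr(litera+97)
--
-- def szuk(norm, szyfr):
--     for i in range(26):
--         for j in range(26):
--             wyraz = ""
--             for k in range(len(norm)):
--                 wyraz+=afiniczny(norm[k],i,j)
--             if wyraz == szyfr:
--                 return i,j
-- ===== SOURCE B (Python) =====
-- def szuk(norm, szyfr):
--     if norm == "":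
--         return (0, 0) if szyfr == "" else None
--     if len(szyfr) != len(norm):
--         return None
--     d0 = ord(norm[0]) - 97
--     e0 = ord(szyfr[0]) - 97
--     for a in range(26):
--         # the only j whose encryption matches szyfr's first letter
--         b = (e0 - d0 * a) % 26
--         if all(chr(((ord(c) - 97) * a + b) % 26 + 97) == s
--                for c, s in zip(norm, szyfr)):
--             return a, b
--     return None
-- ===== Notes on version B (the rewrite author's own statement) =====
-- stated objective: faster
-- what changed: Instead of brute-forcing all 26*26 (A,B) key pairs and re-encrypting norm for each, B derives for each multiplier A the single additive key B that can map norm's first character to szyfr's first character and verifies only that candidate with an early-exit scan; …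
-- outside the precondition, e.g. on szuk('`', '`'): A returns (1, 0), B returns None
import Mathlib
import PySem

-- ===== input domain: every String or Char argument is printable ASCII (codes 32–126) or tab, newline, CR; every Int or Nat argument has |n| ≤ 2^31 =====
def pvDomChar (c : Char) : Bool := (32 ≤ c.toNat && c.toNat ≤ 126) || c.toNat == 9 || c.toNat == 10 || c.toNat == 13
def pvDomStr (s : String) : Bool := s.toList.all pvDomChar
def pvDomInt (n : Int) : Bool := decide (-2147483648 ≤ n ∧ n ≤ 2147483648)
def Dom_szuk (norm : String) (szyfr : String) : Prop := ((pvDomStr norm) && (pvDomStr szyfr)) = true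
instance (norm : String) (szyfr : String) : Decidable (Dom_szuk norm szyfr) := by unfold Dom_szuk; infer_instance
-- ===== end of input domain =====

-- B replaces A's brute force over all 26*26 key pairs by deriving, per multiplier, the one
-- additive key matching the first character and verifying only that candidate (objective: faster).

-- ===== PORT A =====
-- chr(l+97) ported as Char.ofNat (l+97).toNat: exact whenever l+97 ≥ 0 (Python raises
-- ValueError on a negative code; Pre_szuk keeps the code nonnegative).
def afiniczny (litera : Char) (A : Int) (B : Int) : Char :=
  let l0 : Int := (litera.toNat : Int) - 97
  let l1 : Int := l0 * A
  let l2 : Int := l1 + B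
  let l3 : Int := if l2 > 25 then PySem.Int.mod l2 26 else l2
  Char.ofNat (l3 + 97).toNat

def szuk (norm : String) (szyfr : String) : Option (List Int) :=
  (PySem.List.pyRange 0 26 1).findSome? fun i =>
    (PySem.List.pyRange 0 26 1).findSome? fun j =>
      let wyraz := norm.toList.foldl (fun w c => w ++ [afiniczny c i j]) []
      if wyraz = szyfr.toList then some [i, j] else none

-- ===== PORT B =====
def szukAltChar (c : Char) (a : Int) (b : Int) : Char :=
  Char.ofNat (PySem.Int.mod (((c.toNat : Int) - 97) * a + b) 26 + 97).toNat

def szuk_alt (norm : String) (szyfr : String) : Option (List Int) :=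
  let n := norm.toList
  let s := szyfr.toList
  if n = [] then (if s = [] then some [0, 0] else none)
  else if s.length ≠ n.length then none
  else
    let d0 : Int := ((n.headD 'a').toNat : Int) - 97
    let e0 : Int := ((s.headD 'a').toNat : Int) - 97
    (PySem.List.pyRange 0 26 1).findSome? fun a =>
      let b := PySem.Int.mod (e0 - d0 * a) 26
      if (n.zip s).all (fun p => szukAltChar p.1 a b == p.2) then some [a, b] else none

-- ===== PRECONDITION & SPEC =====
-- Pre_ admits norms of characters with code ≥ 97 (the cipher's natural domain), plus any
-- length-mismatched pair whose norm characters have code ≥ 94 (A cannot crash or match there);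
-- on remaining lower-code characters A either raises ValueError (chr of a negative code) or
-- returns keys obtained by comparing non-letter characters produced without the mod 26 reduction, values B cannot be expected to match.
def Pre_szuk (norm : String) (szyfr : String) : Prop :=
  (norm.toList.all fun c => 97 ≤ c.toNat) = true ∨
  ((norm.toList.all fun c => 94 ≤ c.toNat) = true ∧ szyfr.toList.length ≠ norm.toList.length)
instance (norm : String) (szyfr : String) : Decidable (Pre_szuk norm szyfr) := by unfold Pre_szuk; infer_instance

def pvWitness_szuk : String × String := ("abc", "bcd")

def Spec_szuk (norm : String) (szyfr : String) (out : Option (List Int)) : Prop := out = szuk_alt norm szyfr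
instance (norm : String) (szyfr : String) (out : Option (List Int)) : Decidable (Spec_szuk norm szyfr out) := by unfold Spec_szuk; infer_instance

-- ===== CLAIM (what is proved, stated in full; the proofs are below) =====
def Claim_equal_szuk : Prop := ∀ (norm : String) (szyfr : String), Dom_szuk norm szyfr → Pre_szuk norm szyfr → Spec_szuk norm szyfr (szuk norm szyfr)

-- ===== LEMMAS AND PROOFS =====

-- A's per-character encryption equals B's (mod-26 form) on codes ≥ 97 with nonneg keys.
theorem afiniczny_eq_altChar (c : Char) (i j : Int) (hc : 97 ≤ c.toNat)
    (hi : 0 ≤ i) (hj : 0 ≤ j) : afiniczny c i j = szukAltChar c i j := by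
  have hd : (0 : Int) ≤ (c.toNat : Int) - 97 := by omega
  have hnn : (0 : Int) ≤ ((c.toNat : Int) - 97) * i + j :=
    add_nonneg (mul_nonneg hd hi) hj
  simp only [afiniczny, szukAltChar]
  rw [PySem.Int.mod_eq_emod_of_pos (by norm_num)]
  generalize hT : ((c.toNat : Int) - 97) * i + j = T at hnn ⊢
  split_ifs with h
  · rfl
  · congr 2
    omega

theorem findSome?_congr_mem {α β : Type} (l : List α) (f g : α → Option β)
    (h : ∀ x ∈ l, f x = g x) : l.findSome? f = l.findSome? g := by
  induction l with
  | nil => rfl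
  | cons a t ih =>
    simp only [List.findSome?_cons, h a (by simp)]
    cases g a with
    | none => simp only []; exact ih (fun x hx => h x (by simp [hx]))
    | some b => rfl

theorem findSome?_eq_none_of_all {α β : Type} (l : List α) (f : α → Option β)
    (h : ∀ x ∈ l, f x = none) : l.findSome? f = none := by
  induction l with
  | nil => rfl
  | cons a t ih =>
    simp only [List.findSome?_cons, h a (by simp)]
    exact ih (fun x hx => h x (by simp [hx]))

-- findSome? over a list in which at most one element can satisfy p reduces to testing it.
theorem findSome?_ite_unique {β : Type} (l : List Int) (p : Int → Prop) [DecidablePred p]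
    (g : Int → β) (jc : Int) (hmem : jc ∈ l) (hu : ∀ j ∈ l, p j → j = jc) :
    l.findSome? (fun j => if p j then some (g j) else none)
      = if p jc then some (g jc) else none := by
  induction l with
  | nil => cases hmem
  | cons a t ih =>
    by_cases ha : p a
    · have : a = jc := hu a (by simp) ha
      subst this
      simp [ha]
    · simp only [List.findSome?_cons, if_neg ha]
      rcases List.mem_cons.mp hmem with h | h
      · subst h
        rw [if_neg ha]
        exact findSome?_eq_none_of_all t _ (fun x hx => by
          by_cases hpx : p x
          · exact absurd (hu x (by simp [hx]) hpx) (fun he => ha (he ▸ hpx))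
          · simp [hpx])
      · exact ih h (fun j hj => hu j (by simp [hj]))

theorem all_zip_iff_map (f : Char → Char) :
    ∀ (n s : List Char), n.length = s.length →
      (((n.zip s).all fun p => f p.1 == p.2) = true ↔ n.map f = s)
  | [], [], _ => by simp
  | [], _ :: _, h => by simp at h
  | _ :: _, [], h => by simp at h
  | c :: n, s0 :: s, h => by
    simp only [List.zip_cons_cons, List.all_cons, List.map_cons, Bool.and_eq_true, beq_iff_eq,
      List.cons.injEq]
    have := all_zip_iff_map f n s (by simpa using h)
    tauto

-- the code of B's encryption character, as a Nat, is mod + 97 (mod ∈ [0,26))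
theorem altChar_toNat (c : Char) (a b : Int) :
    (szukAltChar c a b).toNat = (PySem.Int.mod (((c.toNat : Int) - 97) * a + b) 26 + 97).toNat := by
  unfold szukAltChar
  rw [PySem.Int.mod_eq_emod_of_pos (by norm_num)]
  have h1 : 0 ≤ (((c.toNat : Int) - 97) * a + b) % 26 := Int.emod_nonneg _ (by norm_num)
  have h2 : (((c.toNat : Int) - 97) * a + b) % 26 < 26 := Int.emod_lt_of_pos _ (by norm_num)
  rw [Char.toNat_ofNat, if_pos (Or.inl (by omega))]

-- only j = (e0 - d0*i) % 26 can encrypt the first character of norm to the first of szyfr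
theorem first_char_determines (c0 s0 : Char) (i j : Int)
    (hj0 : 0 ≤ j) (hj26 : j < 26)
    (h : szukAltChar c0 i j = s0) :
    j = PySem.Int.mod (((s0.toNat : Int) - 97) - ((c0.toNat : Int) - 97) * i) 26 := by
  have hn := congrArg Char.toNat h
  rw [altChar_toNat] at hn
  simp only [PySem.Int.mod_eq_emod_of_pos (show (0:Int) < 26 by norm_num)] at hn ⊢
  have h1 : 0 ≤ (((c0.toNat : Int) - 97) * i + j) % 26 := Int.emod_nonneg _ (by norm_num)
  have h2 : (((c0.toNat : Int) - 97) * i + j) % 26 < 26 := Int.emod_lt_of_pos _ (by norm_num)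
  have hs : (s0.toNat : Int) = (((c0.toNat : Int) - 97) * i + j) % 26 + 97 := by omega
  rw [hs]
  generalize ((c0.toNat : Int) - 97) * i = t at *
  omega

-- jc lies in range(26)
theorem jc_mem (x : Int) : PySem.Int.mod x 26 ∈ PySem.List.pyRange 0 26 1 := by
  rw [PySem.List.mem_pyRange_one, PySem.Int.mod_eq_emod_of_pos (by norm_num)]
  exact ⟨Int.emod_nonneg _ (by norm_num), Int.emod_lt_of_pos _ (by norm_num)⟩

-- ===== VERDICT (by name: the statement is the Claim_ definition above) =====
theorem szuk_spec : Claim_equal_szuk := by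
  intro norm szyfr _ hpre0
  unfold Spec_szuk szuk szuk_alt
  simp only []
  by_cases hlen : szyfr.toList.length = norm.toList.length
  case neg =>
    -- lengths differ: every candidate word has norm's length, so A finds nothing; B's guard fires
    have hA : ((PySem.List.pyRange 0 26 1).findSome? fun i =>
        (PySem.List.pyRange 0 26 1).findSome? fun j =>
          let wyraz := norm.toList.foldl (fun w c => w ++ [afiniczny c i j]) []
          if wyraz = szyfr.toList then some [i, j] else none) = none := by
      refine findSome?_eq_none_of_all _ _ (fun i _ => ?_)
      refine findSome?_eq_none_of_all _ _ (fun j _ => ?_)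
      have hw : norm.toList.foldl (fun w c => w ++ [afiniczny c i j]) []
          = norm.toList.map (fun c => afiniczny c i j) := by
        rw [PySem.List.foldl_append_singleton_eq_map]
        simp
      simp only [hw]
      rw [if_neg (fun h => hlen (by rw [← h, List.length_map]))]
    rw [hA]
    by_cases hn : norm.toList = []
    · rw [if_pos hn, if_neg (fun hs => hlen (by rw [hs, hn]))]
    · rw [if_neg hn, if_pos hlen]
  case pos =>
    have hpre : ∀ c ∈ norm.toList, 97 ≤ c.toNat := by
      rcases hpre0 with h | h
      · simpa [List.all_eq_true] using h
      · exact absurd hlen h.2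
    -- rewrite A's inner loop: the foldl-built word is a map, and afiniczny is B's character map
    rw [findSome?_congr_mem _ _
      (fun i => (PySem.List.pyRange 0 26 1).findSome? fun j =>
        if norm.toList.map (fun c => szukAltChar c i j) = szyfr.toList then some [i, j] else none)
      (by
        intro i hi
        have hi' := (PySem.List.mem_pyRange_one).mp hi
        apply findSome?_congr_mem
        intro j hj
        have hj' := (PySem.List.mem_pyRange_one).mp hj
        have hw : norm.toList.foldl (fun w c => w ++ [afiniczny c i j]) []
            = norm.toList.map (fun c => szukAltChar c i j) := by
          rw [PySem.List.foldl_append_singleton_eq_map]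
          simp only [List.nil_append]
          exact List.map_congr_left (fun c hc => afiniczny_eq_altChar c i j (hpre c hc) hi'.1 hj'.1)
        simp only [hw])]
    by_cases hn : norm.toList = []
    · rw [if_pos hn]
      have hs : szyfr.toList = [] := List.eq_nil_of_length_eq_zero (by rw [hlen, hn, List.length_nil])
      rw [if_pos hs]
      rw [PySem.List.pyRange_one_cons (by norm_num)]
      simp [hn, hs]
    · rw [if_neg hn]
      obtain ⟨c0, n0, hn0⟩ := List.exists_cons_of_ne_nil hn
      rw [if_neg (by omega)]
      obtain ⟨s0, s0t, hs0⟩ : ∃ s0 s0t, szyfr.toList = s0 :: s0t := by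
        cases hsz : szyfr.toList with
        | nil => rw [hsz, List.length_nil, hn0] at hlen; simp at hlen
        | cons a b => exact ⟨a, b, rfl⟩
      apply findSome?_congr_mem
      intro i hi
      have hd0 : norm.toList.headD 'a' = c0 := by rw [hn0]; rfl
      have he0 : szyfr.toList.headD 'a' = s0 := by rw [hs0]; rfl
      rw [hd0, he0]
      have hkey := findSome?_ite_unique (PySem.List.pyRange 0 26 1)
        (fun j => norm.toList.map (fun c => szukAltChar c i j) = szyfr.toList)
        (fun j => [i, j])
        (PySem.Int.mod (((s0.toNat : Int) - 97) - ((c0.toNat : Int) - 97) * i) 26)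
        (jc_mem _)
        (by
          intro j hj hPj
          have hj' := (PySem.List.mem_pyRange_one).mp hj
          have hhead : szukAltChar c0 i j = s0 := by
            rw [hn0, hs0, List.map_cons] at hPj
            exact (List.cons.injEq _ _ _ _ ▸ hPj).1
          exact first_char_determines c0 s0 i j hj'.1 hj'.2 hhead)
      rw [hkey]
      have hall := all_zip_iff_map (fun c => szukAltChar c i
          (PySem.Int.mod (((s0.toNat : Int) - 97) - ((c0.toNat : Int) - 97) * i) 26))
        norm.toList szyfr.toList hlen.symm
      by_cases hP : norm.toList.map (fun c => szukAltChar c i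
          (PySem.Int.mod (((s0.toNat : Int) - 97) - ((c0.toNat : Int) - 97) * i) 26)) = szyfr.toList
      · rw [if_pos hP, if_pos (hall.mpr hP)]
      · rw [if_neg hP, if_neg (fun h => hP (hall.mp h))]
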